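-- pv_equiv track=rewrite | github.com/kemal-faza/responsi-daspro | duel-sihir.py | PoinMenang
-- ===== SOURCE A (Python) =====
-- def FirstElmt(L):
--     return L[0]
--
-- def Tail(L):
--     return L[1:]
--
-- def Konso(e, L):
--     return [e] + L
--
-- def isEmpty(L):
--     return L == []
--
-- def dimensi(L):  # atau NbElmt()
--     if isEmpty(L):
--         return 0
--     else:
--         return 1 + dimensi(Tail(L))
--
-- def PoinMenang(S, M, lvlS, lvlM):
--     if isEmpty(S) and isEmpty(M):
--         if dimensi(lvlS) > dimensi(lvlM):
--             return "Snape Menang"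
--         elif dimensi(lvlS) < dimensi(lvlM):
--             return "McGonagall Menang"
--         else:
--             return "Keduanya Seri"
--     elif FirstElmt(S) == FirstElmt(M):
--         return PoinMenang(Tail(S), Tail(M), lvlS, lvlM)
--     elif FirstElmt(S) > FirstElmt(M):
--         return PoinMenang(Tail(S), Tail(M), Konso(1, lvlS), lvlM)
--     elif FirstElmt(S) < FirstElmt(M):
--         return PoinMenang(Tail(S), Tail(M), lvlS, Konso(1, lvlM))
-- ===== SOURCE B (Python) =====
-- def PoinMenang(S, M, lvlS, lvlM):
--     winS = 0
--     winM = 0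
--     i = 0
--     while i < len(S) or i < len(M):
--         a = S[i]
--         b = M[i]
--         if a > b:
--             winS += 1
--         elif a < b:
--             winM += 1
--         i += 1
--     pS = len(lvlS) + winS
--     pM = len(lvlM) + winM
--     if pS > pM:
--         return "Snape Menang"
--     elif pS < pM:
--         return "McGonagall Menang"
--     else:
--         return "Keduanya Seri"
-- ===== Notes on version B (the rewrite author's own statement) =====
-- stated objective: faster
-- what changed: Replaces the deep recursion with cons-list accumulators and a recursive length by an iterative index loop with two integer win counters compared against the original level-list lengths.
import Mathlib
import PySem

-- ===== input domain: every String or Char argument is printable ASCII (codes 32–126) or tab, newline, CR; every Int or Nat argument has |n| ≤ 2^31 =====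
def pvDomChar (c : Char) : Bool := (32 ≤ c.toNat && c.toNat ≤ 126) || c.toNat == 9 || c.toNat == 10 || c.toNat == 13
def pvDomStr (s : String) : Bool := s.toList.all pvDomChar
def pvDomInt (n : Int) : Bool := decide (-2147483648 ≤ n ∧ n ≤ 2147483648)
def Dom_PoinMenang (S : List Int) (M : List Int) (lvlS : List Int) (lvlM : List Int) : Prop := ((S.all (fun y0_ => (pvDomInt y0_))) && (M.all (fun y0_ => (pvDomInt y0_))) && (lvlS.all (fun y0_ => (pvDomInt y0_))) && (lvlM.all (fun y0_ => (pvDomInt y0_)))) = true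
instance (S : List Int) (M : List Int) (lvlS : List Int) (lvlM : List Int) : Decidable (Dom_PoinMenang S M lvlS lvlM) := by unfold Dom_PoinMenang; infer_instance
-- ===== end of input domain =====

-- B replaces A's recursion with cons-list accumulators (and its recursive dimensi length)
-- by a single index loop maintaining two win counters; equivalence is proved on equal-length
-- spell lists (on unequal lengths both Pythons raise IndexError).

-- ===== PORT A =====
-- dimensi(L): recursive length, returns Python int
def dimensi : List Int → Int
  | [] => 0
  | _ :: t => 1 + dimensi t

def PoinMenang (S : List Int) (M : List Int) (lvlS : List Int) (lvlM : List Int) : String :=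
  match S, M with
  | [], [] =>
      if dimensi lvlS > dimensi lvlM then "Snape Menang"
      else if dimensi lvlS < dimensi lvlM then "McGonagall Menang"
      else "Keduanya Seri"
  | a :: S', b :: M' =>
      if a = b then PoinMenang S' M' lvlS lvlM
      else if a > b then PoinMenang S' M' (1 :: lvlS) lvlM
      else PoinMenang S' M' lvlS (1 :: lvlM)  -- final 'elif a < b' always fires here
  | _, _ => ""  -- FirstElmt on an empty list: IndexError in Python; excluded by Pre_

-- ===== PORT B =====
-- the while loop: index i, counters winS/winM; none = IndexError (one list exhausted first)
def loopB (S M : List Int) (i : Nat) (winS winM : Int) : Option (Int × Int) :=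
  if _h : i < S.length ∨ i < M.length then
    match PySem.List.pyGet? S (i : Int), PySem.List.pyGet? M (i : Int) with
    | some a, some b =>
        if a > b then loopB S M (i + 1) (winS + 1) winM
        else if a < b then loopB S M (i + 1) winS (winM + 1)
        else loopB S M (i + 1) winS winM
    | _, _ => none
  else some (winS, winM)
termination_by max S.length M.length - i
decreasing_by all_goals omega

def PoinMenang_alt (S : List Int) (M : List Int) (lvlS : List Int) (lvlM : List Int) : String :=
  match loopB S M 0 0 0 with
  | none => ""  -- IndexError in Python; excluded by Pre_
  | some (winS, winM) =>
      let pS : Int := (lvlS.length : Int) + winS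
      let pM : Int := (lvlM.length : Int) + winM
      if pS > pM then "Snape Menang"
      else if pS < pM then "McGonagall Menang"
      else "Keduanya Seri"

-- ===== PRECONDITION & SPEC =====
-- On unequal-length S/M both Pythons raise IndexError, so those inputs are excluded.
def Pre_PoinMenang (S : List Int) (M : List Int) (lvlS : List Int) (lvlM : List Int) : Prop :=
  S.length = M.length

instance (S : List Int) (M : List Int) (lvlS : List Int) (lvlM : List Int) : Decidable (Pre_PoinMenang S M lvlS lvlM) := by unfold Pre_PoinMenang; infer_instance

def pvWitness_PoinMenang : List Int × List Int × List Int × List Int := ([3, 1, 2], [2, 1, 5], [], [1])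

def Spec_PoinMenang (S : List Int) (M : List Int) (lvlS : List Int) (lvlM : List Int) (out : String) : Prop := out = PoinMenang_alt S M lvlS lvlM
instance (S : List Int) (M : List Int) (lvlS : List Int) (lvlM : List Int) (out : String) : Decidable (Spec_PoinMenang S M lvlS lvlM out) := by unfold Spec_PoinMenang; infer_instance

-- ===== CLAIM (what is proved, stated in full; the proofs are below) =====
def Claim_equal_PoinMenang : Prop := ∀ (S : List Int) (M : List Int) (lvlS : List Int) (lvlM : List Int), Dom_PoinMenang S M lvlS lvlM → Pre_PoinMenang S M lvlS lvlM → Spec_PoinMenang S M lvlS lvlM (PoinMenang S M lvlS lvlM)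

-- ===== LEMMAS AND PROOFS =====

-- paired win counts over the two spell lists
def cnts : List Int → List Int → Int × Int
  | a :: S, b :: M =>
      let p := cnts S M
      (if a > b then p.1 + 1 else p.1, if a < b then p.2 + 1 else p.2)
  | _, _ => (0, 0)

def verdict (pS pM : Int) : String :=
  if pS > pM then "Snape Menang"
  else if pS < pM then "McGonagall Menang"
  else "Keduanya Seri"

theorem dimensi_eq_length (L : List Int) : dimensi L = (L.length : Int) := by
  induction L with
  | nil => simp [dimensi]
  | cons x t ih => simp [dimensi, ih]; ring

theorem PoinMenang_eq_verdict (S M lvlS lvlM : List Int) (h : S.length = M.length) :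
    PoinMenang S M lvlS lvlM =
      verdict ((lvlS.length : Int) + (cnts S M).1) ((lvlM.length : Int) + (cnts S M).2) := by
  induction S generalizing M lvlS lvlM with
  | nil =>
      cases M with
      | nil => simp [PoinMenang, cnts, verdict, dimensi_eq_length]
      | cons b M' => simp at h
  | cons a S' ih =>
      cases M with
      | nil => simp at h
      | cons b M' =>
          have h' : S'.length = M'.length := by simpa using h
          by_cases hab : a = b
          · have hlt : ¬ a > b := by omega
            simp [PoinMenang, cnts, hab, ih M' lvlS lvlM h']
          · by_cases hgt : a > b
            · have : ¬ a < b := by omega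
              rw [PoinMenang]
              simp only [hab, hgt, if_true, if_false]
              rw [ih M' (1 :: lvlS) lvlM h']
              have hnl : ¬ a < b := by omega
              simp [cnts, hgt, hnl]
              congr 1; ring
            · have hlt : a < b := by omega
              rw [PoinMenang]
              simp only [hab, hgt, if_false]
              rw [ih M' lvlS (1 :: lvlM) h']
              simp [cnts, hgt, hlt]
              congr 1; ring

theorem loopB_eq (S M : List Int) (h : S.length = M.length) :
    ∀ (i : Nat) (winS winM : Int),
      loopB S M i winS winM =
        some (winS + (cnts (S.drop i) (M.drop i)).1, winM + (cnts (S.drop i) (M.drop i)).2) := by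
  intro i
  induction hn : S.length - i generalizing i with
  | zero =>
      intro winS winM
      have hi : ¬ (i < S.length ∨ i < M.length) := by omega
      rw [loopB]
      simp [hi, List.drop_eq_nil_of_le (by omega : S.length ≤ i),
            List.drop_eq_nil_of_le (by omega : M.length ≤ i), cnts]
  | succ n ih =>
      intro winS winM
      have hiS : i < S.length := by omega
      have hiM : i < M.length := by omega
      rw [loopB]
      simp only [hiS, hiM, true_or, dif_pos]
      rw [PySem.List.pyGet?_natCast, PySem.List.pyGet?_natCast,
          List.getElem?_eq_getElem hiS, List.getElem?_eq_getElem hiM]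
      have hdS : S.drop i = S[i] :: S.drop (i + 1) := (List.getElem_cons_drop hiS).symm
      have hdM : M.drop i = M[i] :: M.drop (i + 1) := (List.getElem_cons_drop hiM).symm
      have ih' := ih (i + 1) (by omega)
      by_cases hgt : S[i] > M[i]
      · simp only [hgt, if_true]
        rw [ih', hdS, hdM]
        have : ¬ S[i] < M[i] := by omega
        simp [cnts, hgt, this]; ring
      · by_cases hlt : S[i] < M[i]
        · simp only [hgt, if_false, hlt, if_true]
          rw [ih', hdS, hdM]
          simp [cnts, hgt, hlt]; ring
        · simp only [hgt, hlt, if_false]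
          rw [ih', hdS, hdM]
          simp [cnts, hgt, hlt]

theorem PoinMenang_alt_eq_verdict (S M lvlS lvlM : List Int) (h : S.length = M.length) :
    PoinMenang_alt S M lvlS lvlM =
      verdict ((lvlS.length : Int) + (cnts S M).1) ((lvlM.length : Int) + (cnts S M).2) := by
  unfold PoinMenang_alt
  rw [loopB_eq S M h 0]
  simp [verdict]

-- ===== VERDICT (by name: the statement is the Claim_ definition above) =====
theorem PoinMenang_spec : Claim_equal_PoinMenang := by
  intro S M lvlS lvlM _ hpre
  unfold Spec_PoinMenang
  rw [PoinMenang_eq_verdict S M lvlS lvlM hpre, PoinMenang_alt_eq_verdict S M lvlS lvlM hpre]
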